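-- pv_equiv track=rewrite | github.com/Sokolinski/python3 | model03/ex5/ft_data_stream.py | game_event_stream
-- ===== SOURCE A (Python) =====
-- from typing import Generator
--
-- def game_event_stream(n: int) -> Generator[tuple, None, None]:
--     players = ["alice", "bob", "charlie"]
--
--     base_events = [
--         ("alice", 5, "killed monster"),
--         ("bob", 12, "found treasure"),
--         ("charlie", 8, "leveled up"),
--     ]
--
--     for event in base_events[:n]:
--         yield event
--
--     high_level_target = 342
--     treasure_target = 89
--     level_up_target = 156
--
--     high_level_count = 1
--     treasure_count = 1
--     level_up_count = 1
--
--     for i in range(3, n):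
--         player = players[i % len(players)]
--
--         if high_level_count < high_level_target:
--             level = 10 + (i % 11)
--             high_level_count += 1
--         else:
--             level = (i % 9) + 1
--
--         if treasure_count < treasure_target:
--             event = "found treasure"
--             treasure_count += 1
--         elif level_up_count < level_up_target:
--             event = "leveled up"
--             level_up_count += 1
--         else:
--             event = "killed monster"
--
--         yield player, level, event
-- ===== SOURCE B (Python) =====
-- def game_event_stream(n: int):
--     players = ["alice", "bob", "charlie"]
--     base_events = [
--         ("alice", 5, "killed monster"),
--         ("bob", 12, "found treasure"),
--         ("charlie", 8, "leveled up"),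
--     ]
--     # Counter thresholds translate into fixed index segments:
--     # treasure for i in [3, 91), leveled up for i in [91, 246),
--     # killed monster from 246; high level (10 + i % 11) while i < 344.
--     yield from base_events[:n]
--     for i in range(3, min(n, 91)):
--         yield players[i % 3], 10 + (i % 11), "found treasure"
--     for i in range(91, min(n, 246)):
--         yield players[i % 3], 10 + (i % 11), "leveled up"
--     for i in range(246, min(n, 344)):
--         yield players[i % 3], 10 + (i % 11), "killed monster"
--     for i in range(344, n):
--         yield players[i % 3], (i % 9) + 1, "killed monster"
-- ===== Notes on version B (the rewrite author's own statement) =====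
-- stated objective: simpler
-- what changed: The single loop with three mutable saturating counters and an if/elif/else per iteration is replaced by four consecutive counter-free loops over fixed index segments ([3,91) treasure, [91,246) leveled up, [246,344) and [344,n) killed monster), each yielding one fixed event shape.
import Mathlib
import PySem

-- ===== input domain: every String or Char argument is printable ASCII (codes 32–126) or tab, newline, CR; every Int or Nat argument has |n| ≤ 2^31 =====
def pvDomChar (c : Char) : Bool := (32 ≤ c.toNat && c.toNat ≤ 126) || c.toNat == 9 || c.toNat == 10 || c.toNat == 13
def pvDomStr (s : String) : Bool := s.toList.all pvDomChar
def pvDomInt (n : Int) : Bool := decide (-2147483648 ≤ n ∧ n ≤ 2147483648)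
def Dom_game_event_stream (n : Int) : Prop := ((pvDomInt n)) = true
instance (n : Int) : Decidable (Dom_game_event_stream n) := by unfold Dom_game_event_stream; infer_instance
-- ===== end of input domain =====

-- B replaces A's single loop with three mutable saturating counters by four
-- consecutive counter-free loops over fixed index segments (simpler).
-- (A is a Python generator; ports model the list of yielded tuples.)


-- ===== PORT A =====
-- players list and base_events, shared verbatim by both Pythons
def pvPlayers : List String := ["alice", "bob", "charlie"]

def pvBase : List (String × Int × String) :=
  [("alice", 5, "killed monster"), ("bob", 12, "found treasure"), ("charlie", 8, "leveled up")]

-- players[i % len(players)]; 0 ≤ i % 3 < 3 so the index is always in range (getD never fires)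
def pvPlayer (i : Int) : String := (PySem.List.pyGet? pvPlayers (PySem.Int.mod i 3)).getD ""

-- one iteration of A's loop body: state = (high_level_count, treasure_count, level_up_count, yielded rows)
def pvStepA (s : Int × Int × Int × List (String × Int × String)) (i : Int) :
    Int × Int × Int × List (String × Int × String) :=
  let player := pvPlayer i
  let lh : Int × Int :=
    if s.1 < 342 then (10 + PySem.Int.mod i 11, s.1 + 1) else (PySem.Int.mod i 9 + 1, s.1)
  let etl : String × Int × Int :=
    if s.2.1 < 89 then ("found treasure", s.2.1 + 1, s.2.2.1)
    else if s.2.2.1 < 156 then ("leveled up", s.2.1, s.2.2.1 + 1)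
    else ("killed monster", s.2.1, s.2.2.1)
  (lh.2, etl.2.1, etl.2.2, s.2.2.2 ++ [(player, lh.1, etl.1)])

def game_event_stream (n : Int) : List (String × Int × String) :=
  PySem.List.slice pvBase none (some n) ++
    ((PySem.List.pyRange 3 n 1).foldl pvStepA (1, 1, 1, [])).2.2.2

-- ===== PORT B =====
-- the four counter-free segment loops of Source B
def pvRowsB (n : Int) : List (String × Int × String) :=
  (PySem.List.pyRange 3 (min n 91) 1).map
      (fun i => (pvPlayer i, 10 + PySem.Int.mod i 11, "found treasure"))
  ++ (PySem.List.pyRange 91 (min n 246) 1).map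
      (fun i => (pvPlayer i, 10 + PySem.Int.mod i 11, "leveled up"))
  ++ (PySem.List.pyRange 246 (min n 344) 1).map
      (fun i => (pvPlayer i, 10 + PySem.Int.mod i 11, "killed monster"))
  ++ (PySem.List.pyRange 344 n 1).map
      (fun i => (pvPlayer i, PySem.Int.mod i 9 + 1, "killed monster"))

def game_event_stream_alt (n : Int) : List (String × Int × String) :=
  PySem.List.slice pvBase none (some n) ++ pvRowsB n

-- ===== PRECONDITION & SPEC =====
def Spec_game_event_stream (n : Int) (out : List (String × Int × String)) : Prop := out = game_event_stream_alt n
instance (n : Int) (out : List (String × Int × String)) : Decidable (Spec_game_event_stream n out) := by unfold Spec_game_event_stream; infer_instance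

-- ===== CLAIM (what is proved, stated in full; the proofs are below) =====
def Claim_equal_game_event_stream : Prop := ∀ (n : Int), Dom_game_event_stream n → Spec_game_event_stream n (game_event_stream n)

-- ===== LEMMAS AND PROOFS =====

lemma pvRowsB_nil {n : Int} (h : n ≤ 3) : pvRowsB n = [] := by
  unfold pvRowsB
  rw [PySem.List.pyRange_one_eq_nil (by omega : min n 91 ≤ 3),
      PySem.List.pyRange_one_eq_nil (by omega : min n 246 ≤ 91),
      PySem.List.pyRange_one_eq_nil (by omega : min n 344 ≤ 246),
      PySem.List.pyRange_one_eq_nil (by omega : n ≤ 344)]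
  simp

lemma pvRowsB_succ {n : Int} (h3 : 3 ≤ n) :
    pvRowsB (n + 1) = pvRowsB n ++
      [(pvPlayer n,
        if n < 344 then 10 + PySem.Int.mod n 11 else PySem.Int.mod n 9 + 1,
        if n < 91 then "found treasure" else if n < 246 then "leveled up" else "killed monster")] := by
  unfold pvRowsB
  rcases lt_or_ge n 91 with h | h
  · rw [show min (n+1) 91 = n + 1 by omega, show min n 91 = n by omega,
        show min (n+1) 246 = n + 1 by omega, show min n 246 = n by omega,
        show min (n+1) 344 = n + 1 by omega, show min n 344 = n by omega,
        PySem.List.pyRange_one_succ_right h3,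
        PySem.List.pyRange_one_eq_nil (by omega : n + 1 ≤ 91),
        PySem.List.pyRange_one_eq_nil (by omega : n ≤ 91),
        PySem.List.pyRange_one_eq_nil (by omega : n + 1 ≤ 246),
        PySem.List.pyRange_one_eq_nil (by omega : n ≤ 246),
        PySem.List.pyRange_one_eq_nil (by omega : n + 1 ≤ 344),
        PySem.List.pyRange_one_eq_nil (by omega : n ≤ 344)]
    simp [show n < 344 by omega, h]
  rcases lt_or_ge n 246 with h2 | h2
  · rw [show min (n+1) 91 = 91 by omega, show min n 91 = 91 by omega,
        show min (n+1) 246 = n + 1 by omega, show min n 246 = n by omega,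
        show min (n+1) 344 = n + 1 by omega, show min n 344 = n by omega,
        PySem.List.pyRange_one_succ_right (by omega : (91:Int) ≤ n),
        PySem.List.pyRange_one_eq_nil (by omega : n + 1 ≤ 246),
        PySem.List.pyRange_one_eq_nil (by omega : n ≤ 246),
        PySem.List.pyRange_one_eq_nil (by omega : n + 1 ≤ 344),
        PySem.List.pyRange_one_eq_nil (by omega : n ≤ 344)]
    simp [show n < 344 by omega, show ¬ n < 91 by omega, h2]
  rcases lt_or_ge n 344 with h4 | h4
  · rw [show min (n+1) 91 = 91 by omega, show min n 91 = 91 by omega,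
        show min (n+1) 246 = 246 by omega, show min n 246 = 246 by omega,
        show min (n+1) 344 = n + 1 by omega, show min n 344 = n by omega,
        PySem.List.pyRange_one_succ_right (by omega : (246:Int) ≤ n),
        PySem.List.pyRange_one_eq_nil (by omega : n + 1 ≤ 344),
        PySem.List.pyRange_one_eq_nil (by omega : n ≤ 344)]
    simp [h4, show ¬ n < 91 by omega, show ¬ n < 246 by omega]
  · rw [show min (n+1) 91 = 91 by omega, show min n 91 = 91 by omega,
        show min (n+1) 246 = 246 by omega, show min n 246 = 246 by omega,
        show min (n+1) 344 = 344 by omega, show min n 344 = 344 by omega,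
        PySem.List.pyRange_one_succ_right (by omega : (344:Int) ≤ n)]
    simp [show ¬ n < 344 by omega, show ¬ n < 91 by omega, show ¬ n < 246 by omega]

-- closed form for A's loop state after k iterations (counters saturate; rows = B's segments)
lemma loopA_closed (k : Nat) :
    (PySem.List.pyRange 3 (3 + (k : Int)) 1).foldl pvStepA (1, 1, 1, []) =
      (1 + min (k : Int) 341, 1 + min (k : Int) 88,
       1 + min (max ((k : Int) - 88) 0) 155, pvRowsB (3 + (k : Int))) := by
  induction k with
  | zero =>
    rw [PySem.List.pyRange_one_eq_nil (by omega), pvRowsB_nil (by omega)]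
    simp
  | succ k ih =>
    have h3 : (3 : Int) ≤ 3 + (k : Int) := by omega
    rw [show (3 + ((k + 1 : Nat) : Int)) = (3 + (k : Int)) + 1 by push_cast; ring,
        PySem.List.pyRange_one_succ_right h3, List.foldl_append, ih, pvRowsB_succ h3]
    simp only [List.foldl_cons, List.foldl_nil, pvStepA]
    by_cases hk1 : (k : Int) < 88
    · rw [if_pos (show (1:Int) + min (k:Int) 341 < 342 by omega),
          if_pos (show (1:Int) + min (k:Int) 88 < 89 by omega)]
      refine Prod.ext (by push_cast; omega) (Prod.ext (by push_cast; omega)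
        (Prod.ext (by push_cast; omega) ?_))
      simp [show (3 + (k:Int)) < 344 by omega, show (3 + (k:Int)) < 91 by omega]
    · by_cases hk2 : (k : Int) < 243
      · rw [if_pos (show (1:Int) + min (k:Int) 341 < 342 by omega),
            if_neg (show ¬ ((1:Int) + min (k:Int) 88 < 89) by omega),
            if_pos (show (1:Int) + min (max ((k:Int) - 88) 0) 155 < 156 by omega)]
        refine Prod.ext (by push_cast; omega) (Prod.ext (by push_cast; omega)
          (Prod.ext (by push_cast; omega) ?_))
        simp [show (3 + (k:Int)) < 344 by omega, show ¬ (3 + (k:Int)) < 91 by omega,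
              show (3 + (k:Int)) < 246 by omega]
      · by_cases hk3 : (k : Int) < 341
        · rw [if_pos (show (1:Int) + min (k:Int) 341 < 342 by omega),
              if_neg (show ¬ ((1:Int) + min (k:Int) 88 < 89) by omega),
              if_neg (show ¬ ((1:Int) + min (max ((k:Int) - 88) 0) 155 < 156) by omega)]
          refine Prod.ext (by push_cast; omega) (Prod.ext (by push_cast; omega)
            (Prod.ext (by push_cast; omega) ?_))
          simp [show (3 + (k:Int)) < 344 by omega, show ¬ (3 + (k:Int)) < 91 by omega,
                show ¬ (3 + (k:Int)) < 246 by omega]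
        · rw [if_neg (show ¬ ((1:Int) + min (k:Int) 341 < 342) by omega),
              if_neg (show ¬ ((1:Int) + min (k:Int) 88 < 89) by omega),
              if_neg (show ¬ ((1:Int) + min (max ((k:Int) - 88) 0) 155 < 156) by omega)]
          refine Prod.ext (by push_cast; omega) (Prod.ext (by push_cast; omega)
            (Prod.ext (by push_cast; omega) ?_))
          simp [show ¬ (3 + (k:Int)) < 344 by omega, show ¬ (3 + (k:Int)) < 91 by omega,
                show ¬ (3 + (k:Int)) < 246 by omega]

-- ===== VERDICT (by name: the statement is the Claim_ definition above) =====
theorem game_event_stream_spec : Claim_equal_game_event_stream := by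
  intro n _
  show game_event_stream n = game_event_stream_alt n
  unfold game_event_stream game_event_stream_alt
  congr 1
  rcases lt_or_ge 3 n with h | h
  swap
  · rw [PySem.List.pyRange_one_eq_nil h, pvRowsB_nil h]; rfl
  · have hk : n = 3 + ((n - 3).toNat : Int) := by omega
    rw [hk, loopA_closed]
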